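-- pv_equiv track=rewrite | github.com/paiml/depyler | examples/hard_linalg_eigenvalue.py | rayleigh_quotient
-- ===== SOURCE A (Python) =====
-- def mat_vec_mult(m: list[int], v: list[int], n: int) -> list[int]:
--     """Multiply n x n matrix by n-vector."""
--     result: list[int] = []
--     i: int = 0
--     while i < n:
--         s: int = 0
--         j: int = 0
--         while j < n:
--             idx: int = i * n + j
--             s = s + m[idx] * v[j]
--             j = j + 1
--         result.append(s)
--         i = i + 1
--     return result
--
-- def rayleigh_quotient(m: list[int], v: list[int], n: int) -> int:
--     """Rayleigh quotient: v^T M v / (v^T v). Integer division."""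
--     mv: list[int] = mat_vec_mult(m, v, n)
--     num: int = 0
--     den: int = 0
--     i: int = 0
--     while i < n:
--         num = num + v[i] * mv[i]
--         den = den + v[i] * v[i]
--         i = i + 1
--     if den == 0:
--         return 0
--     return num // den
-- ===== SOURCE B (Python) =====
-- def rayleigh_quotient(m: list[int], v: list[int], n: int) -> int:
--     """Rayleigh quotient: v^T M v / (v^T v). Integer division.
--
--     Computes the numerator as the quadratic form: a single flat loop over
--     all n*n matrix entries, with the row/column of entry k recovered by
--     divmod, instead of a matrix-vector product followed by a dot product."""
--     if n <= 0:
--         return 0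
--     num = 0
--     for k in range(n * n):
--         num += v[k // n] * m[k] * v[k % n]
--     den = sum(x * x for x in v[:n])
--     return num // den if den else 0
-- ===== Notes on version B (the rewrite author's own statement) =====
-- stated objective: alternative
-- what changed: Computes the numerator directly as the quadratic form v^T M v with one flat loop over all n*n matrix entries, recovering the row and column of entry k by divmod (k//n, k%n), and the denominator as sum(x*x for x in v[:n]); there is no mat_vec_mult helper and no intermediate matrix-vector product.
import Mathlib
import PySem

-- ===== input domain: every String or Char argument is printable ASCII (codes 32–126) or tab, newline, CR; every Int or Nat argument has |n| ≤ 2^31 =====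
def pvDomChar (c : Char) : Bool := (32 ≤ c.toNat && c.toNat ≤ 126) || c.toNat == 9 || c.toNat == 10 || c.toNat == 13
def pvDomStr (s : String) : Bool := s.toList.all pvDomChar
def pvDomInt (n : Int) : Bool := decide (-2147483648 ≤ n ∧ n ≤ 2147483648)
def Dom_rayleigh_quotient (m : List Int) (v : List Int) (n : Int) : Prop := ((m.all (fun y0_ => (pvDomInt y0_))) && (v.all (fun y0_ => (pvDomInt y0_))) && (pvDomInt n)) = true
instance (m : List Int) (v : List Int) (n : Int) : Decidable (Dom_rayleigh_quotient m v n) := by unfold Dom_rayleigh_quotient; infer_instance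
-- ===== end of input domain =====

-- B computes the numerator as the quadratic form v^T M v by ONE flat loop over all n*n matrix
-- entries (row/column recovered by divmod), instead of A's matrix-vector product followed by a
-- dot product; objective: alternative. Equivalence proved on Pre_ (indices in range).

-- ===== PORT A =====
-- inner while loop of mat_vec_mult (fuel = (n - j).toNat at entry)
def pvInnerA (m v : List Int) (n i : Int) (j s : Int) : Nat → Int
  | 0 => s
  | f+1 =>
    if j < n then
      pvInnerA m v n i (j+1) (s + PySem.List.pyGetD m (i*n+j) 0 * PySem.List.pyGetD v j 0) f
    else s

-- outer while loop of mat_vec_mult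
def pvOuterA (m v : List Int) (n : Int) (i : Int) (result : List Int) : Nat → List Int
  | 0 => result
  | f+1 =>
    if i < n then
      pvOuterA m v n (i+1) (result ++ [pvInnerA m v n i 0 0 n.toNat]) f
    else result

def mat_vec_mult (m v : List Int) (n : Int) : List Int := pvOuterA m v n 0 [] n.toNat

-- second while loop of rayleigh_quotient
def pvLoopA (v mv : List Int) (n : Int) (i num den : Int) : Nat → Int × Int
  | 0 => (num, den)
  | f+1 =>
    if i < n then
      pvLoopA v mv n (i+1)
        (num + PySem.List.pyGetD v i 0 * PySem.List.pyGetD mv i 0)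
        (den + PySem.List.pyGetD v i 0 * PySem.List.pyGetD v i 0) f
    else (num, den)

def rayleigh_quotient (m : List Int) (v : List Int) (n : Int) : Int :=
  let mv := mat_vec_mult m v n
  let nd := pvLoopA v mv n 0 0 0 n.toNat
  if nd.2 = 0 then 0 else PySem.Int.floordiv nd.1 nd.2

-- ===== PORT B =====
def rayleigh_quotient_alt (m : List Int) (v : List Int) (n : Int) : Int :=
  if n ≤ 0 then 0
  else
    let num := (PySem.List.pyRange 0 (n*n) 1).foldl
      (fun a k => a + PySem.List.pyGetD v (PySem.Int.floordiv k n) 0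
                      * PySem.List.pyGetD m k 0
                      * PySem.List.pyGetD v (PySem.Int.mod k n) 0) 0
    let den := ((PySem.List.slice v none (some n)).map (fun x => x * x)).sum
    if den = 0 then 0 else PySem.Int.floordiv num den

-- ===== PRECONDITION & SPEC =====
-- Pre_ excludes exactly the inputs on which A raises IndexError (a row or matrix index out of range).
def Pre_rayleigh_quotient (m : List Int) (v : List Int) (n : Int) : Prop :=
  n ≤ 0 ∨ (n ≤ (v.length : Int) ∧ n * n ≤ (m.length : Int))
instance (m : List Int) (v : List Int) (n : Int) : Decidable (Pre_rayleigh_quotient m v n) := by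
  unfold Pre_rayleigh_quotient; infer_instance

def pvWitness_rayleigh_quotient : List Int × List Int × Int := ([2, 0, 0, 3], [1, 1], 2)

def Spec_rayleigh_quotient (m : List Int) (v : List Int) (n : Int) (out : Int) : Prop := out = rayleigh_quotient_alt m v n
instance (m : List Int) (v : List Int) (n : Int) (out : Int) : Decidable (Spec_rayleigh_quotient m v n out) := by unfold Spec_rayleigh_quotient; infer_instance

-- ===== CLAIM (what is proved, stated in full; the proofs are below) =====
def Claim_equal_rayleigh_quotient : Prop := ∀ (m : List Int) (v : List Int) (n : Int), Dom_rayleigh_quotient m v n → Pre_rayleigh_quotient m v n → Spec_rayleigh_quotient m v n (rayleigh_quotient m v n)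

-- ===== LEMMAS AND PROOFS =====

-- the list A's mat_vec_mult outer loop appends, row by row
def pvRows (m v : List Int) (n : Int) (i : Int) : Nat → List Int
  | 0 => []
  | f+1 => if i < n then pvInnerA m v n i 0 0 n.toNat :: pvRows m v n (i+1) f else []

theorem pvOuterA_eq_rows (m v : List Int) (n : Int) :
    ∀ (f : Nat) (i : Int) (acc : List Int),
      pvOuterA m v n i acc f = acc ++ pvRows m v n i f := by
  intro f
  induction f with
  | zero => intro i acc; simp [pvOuterA, pvRows]
  | succ f ih =>
    intro i acc
    simp only [pvOuterA, pvRows]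
    by_cases h : i < n
    · simp [h, ih]
    · simp [h]

theorem pvRows_get (m v : List Int) (n : Int) :
    ∀ (f : Nat) (p : Nat) (i : Int), p < f → i + p < n →
      (pvRows m v n i f)[p]? = some (pvInnerA m v n (i + p) 0 0 n.toNat) := by
  intro f
  induction f with
  | zero => intro p i hp _; omega
  | succ f ih =>
    intro p i hp hin
    have hi : i < n := by omega
    simp only [pvRows, if_pos hi]
    cases p with
    | zero => simp
    | succ q =>
      have := ih q (i+1) (by omega) (by omega)
      simpa [show i + 1 + (q : Int) = i + ((q : Nat) + 1 : Nat) by push_cast; ring] using this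

theorem pvInnerA_eq_sum (m v : List Int) (n i : Int) :
    ∀ (f : Nat) (j s : Int), f = (n - j).toNat →
      pvInnerA m v n i j s f =
        s + ((PySem.List.pyRange j n 1).map
          (fun jj => PySem.List.pyGetD m (i*n+jj) 0 * PySem.List.pyGetD v jj 0)).sum := by
  intro f
  induction f with
  | zero =>
    intro j s hf
    have hj : n ≤ j := by omega
    rw [PySem.List.pyRange_one_eq_nil hj]
    simp [pvInnerA]
  | succ f ih =>
    intro j s hf
    have hj : j < n := by omega
    rw [PySem.List.pyRange_one_cons hj]
    simp only [pvInnerA, if_pos hj, List.map_cons, List.sum_cons]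
    rw [ih (j+1) _ (by omega)]
    ring

theorem pvLoopA_eq_sums (m v : List Int) (n : Int) :
    ∀ (f : Nat) (i num den : Int), 0 ≤ i → f = (n - i).toNat →
      pvLoopA v (mat_vec_mult m v n) n i num den f =
        (num + ((PySem.List.pyRange i n 1).map
                (fun k => PySem.List.pyGetD v k 0 *
                  ((PySem.List.pyRange 0 n 1).map
                    (fun j => PySem.List.pyGetD m (k*n+j) 0 * PySem.List.pyGetD v j 0)).sum)).sum,
         den + ((PySem.List.pyRange i n 1).map
                (fun k => PySem.List.pyGetD v k 0 * PySem.List.pyGetD v k 0)).sum) := by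
  intro f
  induction f with
  | zero =>
    intro i num den _ hf
    have hi : n ≤ i := by omega
    rw [PySem.List.pyRange_one_eq_nil hi]
    simp [pvLoopA]
  | succ f ih =>
    intro i num den h0 hf
    have hi : i < n := by omega
    rw [PySem.List.pyRange_one_cons hi]
    simp only [pvLoopA, if_pos hi, List.map_cons, List.sum_cons]
    have hmv : PySem.List.pyGetD (mat_vec_mult m v n) i 0 = pvInnerA m v n i 0 0 n.toNat := by
      have hcast : i = ((i.toNat : Nat) : Int) := by omega
      rw [mat_vec_mult, pvOuterA_eq_rows, List.nil_append, hcast,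
          PySem.List.pyGetD_natCast]
      have hget := pvRows_get m v n n.toNat i.toNat 0 (by omega) (by omega)
      rw [List.getD_eq_getElem?_getD]
      simp only [zero_add] at hget
      rw [hget, ← hcast]
      rfl
    rw [ih (i+1) _ _ (by omega) (by omega), hmv,
        pvInnerA_eq_sum m v n i n.toNat 0 0 (by omega)]
    simp only [Prod.mk.injEq]
    constructor <;> ring

-- one block of B's flat sum is one row term of A's sum
theorem pvBlock_sum (m v : List Int) (n i : Int) (hn : 0 < n) (_hi : 0 ≤ i) :
    ((PySem.List.pyRange (i*n) (i*n+n) 1).map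
      (fun k => PySem.List.pyGetD v (PySem.Int.floordiv k n) 0
                * PySem.List.pyGetD m k 0
                * PySem.List.pyGetD v (PySem.Int.mod k n) 0)).sum =
    PySem.List.pyGetD v i 0 *
      ((PySem.List.pyRange 0 n 1).map
        (fun j => PySem.List.pyGetD m (i*n+j) 0 * PySem.List.pyGetD v j 0)).sum := by
  rw [← List.sum_map_mul_left]
  have h1 : PySem.List.pyRange (i*n) (i*n+n) 1
      = (List.range n.toNat).map (fun (t : Nat) => i*n + (t : Int)) := by
    rw [PySem.List.pyRange_one, show i*n + n - i*n = n by ring]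
  have h2 : PySem.List.pyRange 0 n 1 = (List.range n.toNat).map (fun (t : Nat) => (0:Int) + (t : Int)) := by
    rw [PySem.List.pyRange_one, show n - (0:Int) = n by ring]
  rw [h1, h2, List.map_map, List.map_map]
  refine congrArg List.sum (List.map_congr_left ?_)
  intro t ht
  rw [List.mem_range] at ht
  have ht0 : (0 : Int) ≤ (t : Int) := Int.natCast_nonneg t
  have htn : (t : Int) < n := by omega
  have hfd : PySem.Int.floordiv (i*n + (t : Int)) n = i := by
    rw [PySem.Int.floordiv_eq_iff_of_pos hn]
    constructor
    · linarith
    · have : (i+1)*n = i*n + n := by ring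
      linarith
  have hmd : PySem.Int.mod (i*n + (t : Int)) n = (t : Int) := by
    have hh := PySem.Int.floordiv_mul_add_mod (i*n + (t : Int)) n
    rw [hfd] at hh
    linarith
  simp only [Function.comp, zero_add]
  rw [hfd, hmd]
  ring

-- B's flat sum over range(n*n) equals A's nested sum
theorem pvFlat_eq_nested (m v : List Int) (n : Int) (hn : 0 < n) :
    ∀ (t : Nat), (t : Int) ≤ n →
      ((PySem.List.pyRange 0 ((t:Int)*n) 1).map
        (fun k => PySem.List.pyGetD v (PySem.Int.floordiv k n) 0
                  * PySem.List.pyGetD m k 0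
                  * PySem.List.pyGetD v (PySem.Int.mod k n) 0)).sum =
      ((PySem.List.pyRange 0 (t:Int) 1).map
        (fun k => PySem.List.pyGetD v k 0 *
          ((PySem.List.pyRange 0 n 1).map
            (fun j => PySem.List.pyGetD m (k*n+j) 0 * PySem.List.pyGetD v j 0)).sum)).sum := by
  intro t
  induction t with
  | zero => simp [PySem.List.pyRange_one_eq_nil]
  | succ t ih =>
    intro hle
    have hc : ((t + 1 : Nat) : Int) = (t : Int) + 1 := by push_cast; ring
    have ht0 : (0 : Int) ≤ (t : Int) := Int.natCast_nonneg t
    have htn : (t : Int) ≤ n := by omega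
    have h0n : (0 : Int) ≤ (t : Int) * n := by positivity
    have hmn : (t : Int) * n ≤ ((t : Int) + 1) * n := by nlinarith
    rw [hc, show ((t : Int) + 1) * n = (t : Int) * n + n by ring,
        PySem.List.pyRange_one_append 0 ((t : Int) * n) ((t : Int) * n + n) h0n (by linarith),
        PySem.List.pyRange_one_succ_right ht0,
        List.map_append, List.sum_append, List.map_append, List.sum_append,
        ih htn]
    congr 1
    simp only [List.map_cons, List.map_nil, List.sum_cons, List.sum_nil, add_zero]
    exact pvBlock_sum m v n (t : Int) hn ht0

theorem pvDen_eq (v : List Int) (n : Int) (hn : 0 < n) (hv : n ≤ (v.length : Int)) :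
    ((PySem.List.pyRange 0 n 1).map
      (fun k => PySem.List.pyGetD v k 0 * PySem.List.pyGetD v k 0)).sum =
    ((PySem.List.slice v none (some n)).map (fun x => x * x)).sum := by
  rw [PySem.List.slice_to v (by omega : (0:Int) ≤ n)]
  have hlen : (((v.take n.toNat).length : Nat) : Int) = n := by
    simp only [List.length_take]
    omega
  have base := PySem.List.map_pyGetD_pyRange_zero' (xs := v.take n.toNat) (d := (0:Int))
  rw [hlen] at base
  rw [← base, List.map_map]
  refine congrArg List.sum (List.map_congr_left ?_)
  intro k hk
  rw [PySem.List.mem_pyRange_one] at hk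
  have hkv : k < (v.length : Int) := by omega
  have hkl : k < ((List.take n.toNat v).length : Int) := by rw [hlen]; exact hk.2
  have h1 : PySem.List.pyGetD (v.take n.toNat) k 0 = PySem.List.pyGetD v k 0 := by
    rw [PySem.List.pyGetD_eq_getElem (xs := List.take n.toNat v) (i := k) (d := 0) hk.1 hkl,
        PySem.List.pyGetD_eq_getElem (xs := v) (i := k) (d := 0) hk.1 hkv]
    simp [List.getElem_take]
  simp only [Function.comp]
  rw [h1]

-- ===== VERDICT (by name: the statement is the Claim_ definition above) =====
theorem rayleigh_quotient_spec : Claim_equal_rayleigh_quotient := by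
  intro m v n _ hpre
  unfold Spec_rayleigh_quotient rayleigh_quotient rayleigh_quotient_alt
  by_cases hn : n ≤ 0
  · have : n.toNat = 0 := by omega
    simp [hn, this, pvLoopA]
  · have hn' : 0 < n := by omega
    have hv : n ≤ (v.length : Int) := by
      rcases hpre with h | ⟨h1, _⟩; · omega
      exact h1
    rw [if_neg hn]
    dsimp only
    rw [pvLoopA_eq_sums m v n n.toNat 0 0 0 le_rfl (by omega)]
    have hflat := pvFlat_eq_nested m v n hn' n.toNat (by omega)
    rw [show ((n.toNat : Int)) = n by omega] at hflat
    have hfold := PySem.List.foldl_add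
      (l := PySem.List.pyRange 0 (n*n) 1)
      (g := fun k => PySem.List.pyGetD v (PySem.Int.floordiv k n) 0
                      * PySem.List.pyGetD m k 0
                      * PySem.List.pyGetD v (PySem.Int.mod k n) 0) (a := 0)
    rw [hfold, hflat, pvDen_eq v n hn' hv]
    simp
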